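-- pv_equiv track=rewrite | github.com/yfundorac/data-labs | module-1/lab-code-simplicity-efficiency/your-code/challenge-3.py | longest_side
-- ===== SOURCE A (Python) =====
-- def longest_side(x):
--     X = x + 1
--     return max([
--         c
--         for c in range(5, X)
--         for b in range(4, X)
--         for a in range(3, X)
--         if (a ** 2 + b ** 2 ==
--             c ** 2)
--     ])
-- ===== SOURCE B (Python) =====
-- def longest_side(x):
--     squares = {n * n for n in range(3, x + 1)}
--     for c in range(x, 4, -1):
--         cc = c * c
--         if any(cc - b * b in squares for b in range(4, x + 1)):
--             return c
--     raise ValueError("no Pythagorean triple with hypotenuse <= x")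
-- ===== Notes on version B (the rewrite author's own statement) =====
-- stated objective: faster
-- what changed: Replaces the exhaustive triple loop + max() over all Pythagorean hypotenuses by a downward scan over candidate hypotenuses with a precomputed set of leg squares, returning the first (= largest) hit.
-- outside the precondition, e.g. on longest_side(3): A raises ValueError, B raises ValueError; on longest_side(4): A raises ValueError, B raises ValueError
import Mathlib
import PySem

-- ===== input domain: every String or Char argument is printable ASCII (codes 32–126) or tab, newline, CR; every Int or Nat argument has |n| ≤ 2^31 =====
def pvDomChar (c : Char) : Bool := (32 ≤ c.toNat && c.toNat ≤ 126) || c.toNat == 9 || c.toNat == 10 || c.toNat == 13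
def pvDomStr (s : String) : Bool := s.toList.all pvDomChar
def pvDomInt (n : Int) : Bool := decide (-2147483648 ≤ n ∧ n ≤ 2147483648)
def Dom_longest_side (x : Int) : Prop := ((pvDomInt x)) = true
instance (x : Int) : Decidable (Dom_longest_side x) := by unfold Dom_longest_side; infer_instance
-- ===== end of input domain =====

-- B replaces A's exhaustive triple loop + max() by a downward hypotenuse scan with a
-- precomputed set of leg squares, returning the first (= largest) hit: asymptotically faster.

-- ===== PORT A =====
-- the triple-loop comprehension [c for c in range(5,X) for b in range(4,X) for a in range(3,X) if a**2+b**2==c**2]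
def lsList (x : Int) : List Int :=
  let X := x + 1
  (PySem.List.pyRange 5 X 1).flatMap (fun c =>
    (PySem.List.pyRange 4 X 1).flatMap (fun b =>
      (PySem.List.pyRange 3 X 1).filterMap (fun a =>
        if a ^ 2 + b ^ 2 = c ^ 2 then some c else none)))

-- max(list); none (ValueError on empty list) is excluded by Pre_, .getD 0 is unreachable there
def longest_side (x : Int) : Int :=
  (PySem.List.max? (lsList x) (fun y => y)).getD 0

-- ===== PORT B =====
-- the 'for c in range(x, 4, -1): if any(...): return c' loop; 0 stands for the
-- ValueError branch after the loop, unreachable under Pre_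
def lsScan (squares : PySem.Set Int) (bs : List Int) : List Int → Int
  | [] => 0
  | c :: cs =>
      if bs.any (fun b => PySem.Set.contains squares (c * c - b * b)) then c
      else lsScan squares bs cs

def longest_side_alt (x : Int) : Int :=
  let squares : PySem.Set Int :=
    PySem.Set.ofList ((PySem.List.pyRange 3 (x + 1) 1).map (fun n => n * n))
  lsScan squares (PySem.List.pyRange 4 (x + 1) 1) (PySem.List.pyRange x 4 (-1))

-- ===== PRECONDITION & SPEC =====
-- A raises ValueError (max of an empty list) for x < 5; the smallest triple 3,4,5 exists once x ≥ 5
def Pre_longest_side (x : Int) : Prop := 5 ≤ x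
instance (x : Int) : Decidable (Pre_longest_side x) := by unfold Pre_longest_side; infer_instance
def pvWitness_longest_side : Int := 5

def Spec_longest_side (x : Int) (out : Int) : Prop := out = longest_side_alt x
instance (x : Int) (out : Int) : Decidable (Spec_longest_side x out) := by unfold Spec_longest_side; infer_instance

-- ===== CLAIM (what is proved, stated in full; the proofs are below) =====
def Claim_equal_longest_side : Prop := ∀ (x : Int), Dom_longest_side x → Pre_longest_side x → Spec_longest_side x (longest_side x)

-- ===== LEMMAS AND PROOFS =====

-- c is a Pythagorean hypotenuse with legs in A's ranges
def Hit (x c : Int) : Prop :=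
  ∃ a, a ∈ PySem.List.pyRange 3 (x + 1) 1 ∧
    ∃ b, b ∈ PySem.List.pyRange 4 (x + 1) 1 ∧ a ^ 2 + b ^ 2 = c ^ 2

lemma mem_lsList (x c' : Int) :
    c' ∈ lsList x ↔ c' ∈ PySem.List.pyRange 5 (x + 1) 1 ∧ Hit x c' := by
  simp only [lsList, Hit, List.mem_flatMap, List.mem_filterMap]
  constructor
  · rintro ⟨c, hc, b, hb, a, ha, hif⟩
    split_ifs at hif with h
    · cases hif; exact ⟨hc, a, ha, b, hb, h⟩
  · rintro ⟨hc, a, ha, b, hb, h⟩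
    exact ⟨c', hc, b, hb, a, ha, by simp [h]⟩

lemma check_iff (x c : Int) :
    ((PySem.List.pyRange 4 (x + 1) 1).any (fun b =>
      PySem.Set.contains
        (PySem.Set.ofList ((PySem.List.pyRange 3 (x + 1) 1).map (fun n => n * n)))
        (c * c - b * b)) = true) ↔ Hit x c := by
  simp only [List.any_eq_true, PySem.Set.contains_iff, PySem.Set.mem_ofList,
    List.mem_map, Hit]
  constructor
  · rintro ⟨b, hb, n, hn, hsq⟩
    exact ⟨n, hn, b, hb, by nlinarith [hsq]⟩
  · rintro ⟨a, ha, b, hb, h⟩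
    exact ⟨b, hb, a, ha, by nlinarith [h]⟩

-- the downward scan returns the maximal element satisfying the check
lemma lsScan_spec (squares : PySem.Set Int) (bs : List Int) (l : List Int) (m : Int)
    (hsort : l.Pairwise (· > ·))
    (hm : m ∈ l)
    (hchk : bs.any (fun b => PySem.Set.contains squares (m * m - b * b)) = true)
    (hmax : ∀ c ∈ l, bs.any (fun b => PySem.Set.contains squares (c * c - b * b)) = true → c ≤ m) :
    lsScan squares bs l = m := by
  induction l with
  | nil => cases hm
  | cons c cs ih =>
    simp only [lsScan]
    by_cases hc : bs.any (fun b => PySem.Set.contains squares (c * c - b * b)) = true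
    · rw [if_pos hc]
      rcases List.mem_cons.mp hm with rfl | hm'
      · rfl
      · have h1 : c > m := (List.pairwise_cons.mp hsort).1 m hm'
        have h2 : c ≤ m := hmax c (List.mem_cons_self) hc
        omega
    · rw [if_neg hc]
      rcases List.mem_cons.mp hm with rfl | hm'
      · exact absurd hchk hc
      · exact ih (List.pairwise_cons.mp hsort).2 hm'
          (fun c' hc' h => hmax c' (List.mem_cons_of_mem _ hc') h)

lemma pyRange_down_pairwise (x : Int) :
    (PySem.List.pyRange x 4 (-1)).Pairwise (· > ·) := by
  rw [PySem.List.pyRange_neg_one_eq_reverse, List.pairwise_reverse]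
  exact PySem.List.pairwise_lt_pyRange_one 5 (x + 1)

-- ===== VERDICT (by name: the statement is the Claim_ definition above) =====
theorem longest_side_spec : Claim_equal_longest_side := by
  intro x _ hpre
  unfold Spec_longest_side Pre_longest_side at *
  -- A's list is nonempty: 5 is in it
  have h5 : (5 : Int) ∈ lsList x := by
    rw [mem_lsList]
    refine ⟨by rw [PySem.List.mem_pyRange_one]; omega,
      3, by rw [PySem.List.mem_pyRange_one]; omega,
      4, by rw [PySem.List.mem_pyRange_one]; omega, by norm_num⟩
  cases hm : PySem.List.max? (lsList x) (fun y => y) with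
  | none =>
      rw [(PySem.List.max?_eq_none_iff _ _).mp hm] at h5
      cases h5
  | some m =>
      have hmem : m ∈ lsList x := PySem.List.max?_mem hm
      have hmax : ∀ y ∈ lsList x, y ≤ m := PySem.List.max?_isMax hm
      have hA : longest_side x = m := by simp [longest_side, hm]
      rw [hA]
      have hmm := (mem_lsList x m).mp hmem
      rw [PySem.List.mem_pyRange_one] at hmm
      symm
      unfold longest_side_alt
      apply lsScan_spec _ _ _ m (pyRange_down_pairwise x)
      · rw [PySem.List.mem_pyRange_neg_one]; omega
      · exact (check_iff x m).mpr hmm.2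
      · intro c hc hchk
        rw [PySem.List.mem_pyRange_neg_one] at hc
        apply hmax
        rw [mem_lsList, PySem.List.mem_pyRange_one]
        exact ⟨⟨by omega, by omega⟩, (check_iff x c).mp hchk⟩
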